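-- pv_equiv track=rewrite | github.com/EvanSun96/codesignal | robinhoodprep.py | sortMatrix_two_ascending_criteria
-- ===== SOURCE A (Python) =====
-- import collections
--
-- def sortMatrix_two_ascending_criteria(m):
--         if not m:
--             return []
--
--         cnts = collections.defaultdict(int)
--         for i in range(len(m)):
--             for j in range(len(m[0])):
--                 cnts[m[i][j]] += 1
--
--         colle_cnts = collections.defaultdict(list)
--         for k in cnts.keys():
--             colle_cnts[cnts[k]].append(k)
--
--         sort_m = []
--         for k in sorted(colle_cnts.keys()):
--             for v in sorted(colle_cnts[k]):
--                 sort_m.append(v)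
--
--         q = [(len(m)-1, len(m)-1)]
--         idx = 0
--         while q and idx < len(sort_m):
--             x, y = q.pop(0)
--             m[x][y] = sort_m[idx]
--             cnts[sort_m[idx]] -= 1
--             if cnts[sort_m[idx]] == 0:
--                 idx += 1
--             if x == 0 and y == 0:
--                 break
--             if y-1>=0 and x +1 == len(m):
--                 # append left child
--                 q.append((x, y-1))
--             if x-1>=0:
--                 q.append((x-1, y))
--
--         return m
-- ===== SOURCE B (Python) =====
-- import collections
--
-- def sortMatrix_two_ascending_criteria(m):
--     if not m:
--         return []
--     n = len(m)
--     cols = len(m[0])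
--     cnt = collections.Counter()
--     for row in m:
--         for j in range(cols):
--             cnt[row[j]] += 1
--     expanded = []
--     for v in sorted(cnt, key=lambda v: (cnt[v], v)):
--         expanded.extend([v] * cnt[v])
--     k = 0
--     for s in range(2 * n - 2, -1, -1):
--         hi = min(n - 1, s)
--         lo = max(0, s - (n - 1))
--         for x in range(hi, lo - 1, -1):
--             if k == len(expanded):
--                 return m
--             m[x][s - x] = expanded[k]
--             k += 1
--     return m
-- ===== Notes on version B (the rewrite author's own statement) =====
-- stated objective: simpler
-- what changed: B drops A's BFS queue entirely and enumerates the anti-diagonal cell order with two index loops, and replaces A's count-grouping defaultdict plus per-group sorts and the count-decrementing cursor by one sort of the distinct values with tuple key (count, value) expanded into a flat list consumed sequentially.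
-- outside the precondition, e.g. on sortMatrix_two_ascending_criteria([[-3], [-2, 0, 2]]): A returns [[-3], [-2, -3, 2]], B returns [[-3], [-2, -3, 2]]
import Mathlib
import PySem

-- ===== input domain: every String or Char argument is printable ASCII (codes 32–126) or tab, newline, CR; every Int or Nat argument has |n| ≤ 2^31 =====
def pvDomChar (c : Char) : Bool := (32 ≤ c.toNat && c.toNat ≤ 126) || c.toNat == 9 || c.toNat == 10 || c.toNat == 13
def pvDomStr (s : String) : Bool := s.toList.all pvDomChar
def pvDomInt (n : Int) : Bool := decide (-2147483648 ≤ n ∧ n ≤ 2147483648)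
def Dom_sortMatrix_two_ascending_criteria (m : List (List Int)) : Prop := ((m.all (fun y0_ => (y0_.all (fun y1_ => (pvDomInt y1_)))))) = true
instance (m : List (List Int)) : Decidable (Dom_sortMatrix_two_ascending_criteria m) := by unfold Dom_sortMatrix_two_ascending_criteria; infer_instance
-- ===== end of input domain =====

-- B drops A's BFS queue for a direct anti-diagonal index enumeration and replaces A's
-- count-grouping dict + per-group sorts + count-decrementing cursor by one (count, value)-keyed
-- sort expanded into a flat list; same return value (both Pythons also mutate m in place identically).

-- ===== PORT A =====
-- m[x][y] = v (indices are in range on every write both programs perform inside Pre_)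
def pvSet2d (m : List (List Int)) (x y : Nat) (v : Int) : List (List Int) :=
  m.set x ((m.getD x []).set y v)

-- the 'while q and idx < len(sort_m)' loop of A (fuel-bounded; fuel 2*n*n+2 never runs out)
def pvLoopA (n : Nat) : Nat → List (List Int) → PySem.Dict Int Int → List Int → List (Nat × Nat) → Nat → List (List Int)
  | 0, m, _, _, _, _ => m
  | fuel + 1, m, cnts, sortm, q, idx =>
    match q with
    | [] => m
    | (x, y) :: qs =>
      if idx < sortm.length then
        let v := sortm.getD idx 0
        let m' := pvSet2d m x y v
        let cnts' := cnts.modify v 0 (· - 1)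
        let idx' := if cnts'.getD v 0 = 0 then idx + 1 else idx
        if x = 0 ∧ y = 0 then m'
        else
          let qs1 := if 1 ≤ y ∧ x + 1 = n then qs ++ [(x, y - 1)] else qs
          let qs2 := if 1 ≤ x then qs1 ++ [(x - 1, y)] else qs1
          pvLoopA n fuel m' cnts' sortm qs2 idx'
      else m

def sortMatrix_two_ascending_criteria (m : List (List Int)) : List (List Int) :=
  if m = [] then [] else
  let n := m.length
  let cols := (m.getD 0 []).length
  let cnts := (List.range n).foldl (fun d i =>
      (List.range cols).foldl (fun d j => d.modify ((m.getD i []).getD j 0) 0 (· + 1)) d)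
    PySem.Dict.empty
  let colle := cnts.keys.foldl (fun d k => d.modify (cnts.getD k 0) [] (· ++ [k])) (PySem.Dict.empty : PySem.Dict Int (List Int))
  let sortm := (PySem.List.sorted colle.keys (fun c => c) false).foldl
      (fun acc c => acc ++ PySem.List.sorted (colle.getD c []) (fun v => v) false) []
  pvLoopA n (2 * n * n + 2) m cnts sortm [(n - 1, n - 1)] 0

-- ===== PORT B =====
-- inner loop 'for x in range(hi, lo - 1, -1)' of B: writes (x, s-x), …, (x-k, s-(x-k)),
-- consuming the head of the expanded list, stopping when it is exhausted
def pvFillDiagB (s : Nat) : Nat → Nat → List (List Int) × List Int → List (List Int) × List Int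
  | _, _, (m, []) => (m, [])
  | x, 0, (m, v :: vs) => (pvSet2d m x (s - x) v, vs)
  | x, k + 1, (m, v :: vs) => pvFillDiagB s (x - 1) k (pvSet2d m x (s - x) v, vs)

-- outer loop 'for s in range(2*n-2, -1, -1)' of B (early return when expanded is exhausted)
def pvFillB (n : Nat) : Nat → List (List Int) × List Int → List (List Int)
  | s, st =>
    match st.2 with
    | [] => st.1
    | _ :: _ =>
      let st' := pvFillDiagB s (min (n - 1) s) (min (n - 1) s - (s - (n - 1))) st
      match s with
      | 0 => st'.1
      | s + 1 => pvFillB n s st'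

def sortMatrix_two_ascending_criteria_alt (m : List (List Int)) : List (List Int) :=
  if m = [] then [] else
  let n := m.length
  let cols := (m.getD 0 []).length
  let cnt := m.foldl (fun d row =>
      (List.range cols).foldl (fun d j => d.modify (row.getD j 0) 0 (· + 1)) d) (PySem.Dict.empty : PySem.Dict Int Int)
  let expanded := (PySem.List.sorted2 cnt.keys (fun v => cnt.getD v 0) (fun v => v) false).foldl
      (fun acc v => acc ++ List.replicate (cnt.getD v 0).toNat v) []
  pvFillB n (2 * n - 2) (m, expanded)

-- ===== PRECONDITION & SPEC =====
-- Pre_ excludes ragged matrices (some row shorter than max(len(m), len(m[0]))): on almost all of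
-- them Python A raises IndexError; on the few where the fill exhausts its counts before reaching a
-- short row A returns a partially overwritten ragged matrix, an accident of its BFS using len(m)
-- as the bound for both dimensions (B happens to return the same value there).
def Pre_sortMatrix_two_ascending_criteria (m : List (List Int)) : Prop :=
  m = [] ∨ (m.getD 0 []).length = 0 ∨
    (∀ row ∈ m, m.length ≤ row.length ∧ (m.getD 0 []).length ≤ row.length)
instance (m : List (List Int)) : Decidable (Pre_sortMatrix_two_ascending_criteria m) := by
  unfold Pre_sortMatrix_two_ascending_criteria; infer_instance
def pvWitness_sortMatrix_two_ascending_criteria : List (List Int) := [[1, 2], [3, 4]]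
def Spec_sortMatrix_two_ascending_criteria (m : List (List Int)) (out : List (List Int)) : Prop := out = sortMatrix_two_ascending_criteria_alt m
instance (m : List (List Int)) (out : List (List Int)) : Decidable (Spec_sortMatrix_two_ascending_criteria m out) := by unfold Spec_sortMatrix_two_ascending_criteria; infer_instance

-- ===== CLAIM (what is proved, stated in full; the proofs are below) =====
def Claim_equal_sortMatrix_two_ascending_criteria : Prop := ∀ (m : List (List Int)), Dom_sortMatrix_two_ascending_criteria m → Pre_sortMatrix_two_ascending_criteria m → Spec_sortMatrix_two_ascending_criteria m (sortMatrix_two_ascending_criteria m)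

-- ===== LEMMAS AND PROOFS =====

-- The equality of the two ports in fact holds for every input of the Lean ports (they totalise
-- Python's partial indexing with defaults); the proof below therefore does not need Pre_, which
-- delimits where Python A itself returns.

-- ---- 1. both counting loops build the same counter ----

theorem pv_range_map_getD {α : Type} (l : List α) (d : α) :
    (List.range l.length).map (fun i => l.getD i d) = l := by
  apply List.ext_getElem (by simp)
  intro i h1 h2
  simp [List.getD_eq_getElem?_getD, List.getElem?_eq_getElem h2]

theorem pv_foldl_range_getD {α β : Type} (l : List α) (d : α) (f : β → α → β) (i : β) :
    (List.range l.length).foldl (fun a j => f a (l.getD j d)) i = l.foldl f i := by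
  conv_rhs => rw [← pv_range_map_getD l d]
  rw [List.foldl_map]

theorem pv_foldl_flatMap {α β γ : Type} (l : List α) (g : α → List β) (f : γ → β → γ) (i : γ) :
    (l.flatMap g).foldl f i = l.foldl (fun a x => (g x).foldl f a) i := by
  induction l generalizing i with
  | nil => rfl
  | cons x xs ih => simp [List.flatMap_cons, List.foldl_append, ih]

def pvGrid (m : List (List Int)) (cols : Nat) : List Int :=
  m.flatMap (fun row => (List.range cols).map (fun j => row.getD j 0))

theorem pv_cntB_eq (m : List (List Int)) (cols : Nat) :
    m.foldl (fun d row =>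
        (List.range cols).foldl (fun d j => d.modify (row.getD j 0) 0 (· + 1)) d)
      (PySem.Dict.empty : PySem.Dict Int Int) = PySem.Dict.counter (pvGrid m cols) := by
  rw [PySem.Dict.counter_eq_foldl, pvGrid, pv_foldl_flatMap]
  simp [List.foldl_map]

theorem pv_cntA_eq (m : List (List Int)) (cols : Nat) :
    (List.range m.length).foldl (fun d i =>
        (List.range cols).foldl (fun d j => d.modify ((m.getD i []).getD j 0) 0 (· + 1)) d)
      (PySem.Dict.empty : PySem.Dict Int Int) = PySem.Dict.counter (pvGrid m cols) := by
  have h := pv_foldl_range_getD m ([] : List Int)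
    (fun d row => (List.range cols).foldl (fun d j => d.modify (row.getD j 0) 0 (· + 1)) d)
    (PySem.Dict.empty : PySem.Dict Int Int)
  exact h.trans (pv_cntB_eq m cols)

-- ---- 2. A's grouped sort equals B's (count, value)-keyed sort ----

-- generic: an insertion sort by an asymmetric, transitive, connected comparator has a
-- unique sorted arrangement
theorem pv_insertBy_pairwise {α : Type} (lt : α → α → Bool)
    (hasym : ∀ a b, lt a b = true → lt b a = false)
    (htrans : ∀ a b c, lt a b = true → lt b c = true → lt a c = true)
    (x : α) (l : List α) (hl : l.Pairwise (fun a b => lt b a = false)) :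
    (PySem.List.insertBy lt x l).Pairwise (fun a b => lt b a = false) := by
  induction l with
  | nil => simp [PySem.List.insertBy]
  | cons y ys ih =>
    rcases List.pairwise_cons.mp hl with ⟨hy, hys⟩
    by_cases hxy : lt x y = true
    · rw [show PySem.List.insertBy lt x (y :: ys) = x :: y :: ys from by
        simp [PySem.List.insertBy, hxy]]
      refine List.pairwise_cons.mpr ⟨?_, hl⟩
      intro z hz
      rcases List.mem_cons.mp hz with rfl | hz2
      · exact hasym x z hxy
      · by_contra hne
        have hzx : lt z x = true := by
          cases h : lt z x
          · exact absurd h hne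
          · rfl
        have := htrans z x y hzx hxy
        rw [hy z hz2] at this
        exact Bool.noConfusion this
    · rw [show PySem.List.insertBy lt x (y :: ys) = y :: PySem.List.insertBy lt x ys from by
        simp [PySem.List.insertBy, hxy]]
      refine List.pairwise_cons.mpr ⟨?_, ih hys⟩
      intro z hz
      rcases (PySem.List.mem_insertBy lt x z ys).mp hz with rfl | hz2
      · exact Bool.not_eq_true _ ▸ (by simpa using hxy)
      · exact hy z hz2

theorem pv_foldl_insertBy_pairwise {α : Type} (lt : α → α → Bool)
    (hasym : ∀ a b, lt a b = true → lt b a = false)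
    (htrans : ∀ a b c, lt a b = true → lt b c = true → lt a c = true) :
    ∀ (xs acc : List α), acc.Pairwise (fun a b => lt b a = false) →
      (xs.foldl (fun a x => PySem.List.insertBy lt x a) acc).Pairwise
        (fun a b => lt b a = false) := by
  intro xs
  induction xs with
  | nil => intro acc h; exact h
  | cons x xs ih =>
    intro acc h
    exact ih _ (pv_insertBy_pairwise lt hasym htrans x acc h)

theorem pv_insertBy_perm {α : Type} (lt : α → α → Bool) (x : α) (l : List α) :
    (PySem.List.insertBy lt x l).Perm (x :: l) := by
  induction l with
  | nil => simp [PySem.List.insertBy]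
  | cons y ys ih =>
    by_cases hxy : lt x y = true
    · simp [PySem.List.insertBy, hxy]
    · rw [show PySem.List.insertBy lt x (y :: ys) = y :: PySem.List.insertBy lt x ys from by
        simp [PySem.List.insertBy, hxy]]
      exact (ih.cons y).trans (List.Perm.swap x y ys)

theorem pv_foldl_insertBy_perm {α : Type} (lt : α → α → Bool) :
    ∀ (xs acc : List α),
      (xs.foldl (fun a x => PySem.List.insertBy lt x a) acc).Perm (acc ++ xs) := by
  intro xs
  induction xs with
  | nil => simp
  | cons x xs ih =>
    intro acc
    have h1 := ih (PySem.List.insertBy lt x acc)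
    have h2 := (pv_insertBy_perm lt x acc).append_right xs
    exact h1.trans (h2.trans List.perm_middle.symm)

theorem pv_foldl_insertBy_eq {α : Type} (lt : α → α → Bool)
    (hasym : ∀ a b, lt a b = true → lt b a = false)
    (htrans : ∀ a b c, lt a b = true → lt b c = true → lt a c = true)
    (hconn : ∀ a b, lt a b = false → lt b a = false → a = b)
    (xs ys : List α) (hperm : ys.Perm xs)
    (hsorted : ys.Pairwise (fun a b => lt a b = true)) :
    xs.foldl (fun acc x => PySem.List.insertBy lt x acc) [] = ys := by
  have h1 := pv_foldl_insertBy_pairwise lt hasym htrans xs [] List.Pairwise.nil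
  have h2 : ys.Pairwise (fun a b => lt b a = false) := hsorted.imp (fun h => hasym _ _ h)
  have h3 : (xs.foldl (fun acc x => PySem.List.insertBy lt x acc) []).Perm ys := by
    have := pv_foldl_insertBy_perm lt xs []
    simpa using this.trans hperm.symm
  exact List.eq_of_perm_of_sorted (fun a b _ _ hab hba => hconn a b hba hab) h1 h2 h3

theorem pv_sorted2_eq (xs ys : List Int) (k1 : Int → Int) (hperm : ys.Perm xs)
    (hsorted : ys.Pairwise (fun a b => k1 a < k1 b ∨ (¬ k1 b < k1 a ∧ a < b))) :
    PySem.List.sorted2 xs k1 (fun v => v) false = ys := by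
  have hdef : PySem.List.sorted2 xs k1 (fun v => v) false
      = xs.foldl (fun acc x => PySem.List.insertBy
          (fun a b => decide (k1 a < k1 b) || (!decide (k1 b < k1 a) && decide (a < b))) x acc) [] := rfl
  rw [hdef]
  apply pv_foldl_insertBy_eq
  · intro a b h
    simp at h ⊢
    omega
  · intro a b c h1 h2
    simp at h1 h2 ⊢
    omega
  · intro a b h1 h2
    simp at h1 h2
    omega
  · exact hperm
  · refine hsorted.imp ?_
    intro a b h
    simp
    omega

theorem pv_colle_getD (cnt : PySem.Dict Int Int) (c : Int) :
    (cnt.keys.foldl (fun d k => d.modify (cnt.getD k 0) [] (· ++ [k]))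
        (PySem.Dict.empty : PySem.Dict Int (List Int))).getD c []
      = cnt.keys.filter (fun k => cnt.getD k 0 == c) := by
  have h1 : cnt.keys.foldl (fun d k => d.modify (cnt.getD k 0) [] (· ++ [k]))
        (PySem.Dict.empty : PySem.Dict Int (List Int))
      = (cnt.keys.map (fun k => (cnt.getD k 0, k))).foldl
          (fun d p => d.modify p.1 [] (· ++ [p.2])) PySem.Dict.empty := by
    rw [List.foldl_map]
  rw [h1, PySem.Dict.getD_foldl_modify_append, List.filter_map]
  simp only [Function.comp_def, PySem.Dict.getD_empty, List.nil_append]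
  rw [List.map_map]
  exact List.map_id' _

theorem pv_colle_keys (cnt : PySem.Dict Int Int) :
    (cnt.keys.foldl (fun d k => d.modify (cnt.getD k 0) [] (· ++ [k]))
        (PySem.Dict.empty : PySem.Dict Int (List Int))).keys
      = PySem.Set.ofList (cnt.keys.map (fun k => cnt.getD k 0)) := by
  rw [PySem.Dict.keys_foldl_modify_key cnt.keys (fun k => cnt.getD k 0) []
    (fun _ k => (· ++ [k])) PySem.Dict.empty]
  rw [PySem.Dict.keys_empty, PySem.Set.ofList_eq_foldl]
  rfl

theorem pv_perm_flatMap_filter (f : Int → Int) :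
    ∀ (cs l : List Int), cs.Nodup → (∀ x ∈ l, f x ∈ cs) →
      (cs.flatMap (fun c => l.filter (fun x => f x == c))).Perm l := by
  intro cs
  induction cs with
  | nil =>
    intro l _ hcov
    have : l = [] := List.eq_nil_iff_forall_not_mem.mpr (fun x hx => by simpa using hcov x hx)
    simp [this]
  | cons c cs ih =>
    intro l hnd hcov
    simp only [List.flatMap_cons]
    have hcns : c ∉ cs := (List.nodup_cons.mp hnd).1
    have hrw : cs.flatMap (fun c' => l.filter (fun x => f x == c')) =
        cs.flatMap (fun c' => (l.filter (fun x => !(f x == c))).filter (fun x => f x == c')) := by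
      apply List.flatMap_congr
      intro c' hc'
      rw [List.filter_filter]
      apply List.filter_congr
      intro x _
      by_cases hfx : f x = c
      · have : c' ≠ c := fun h => hcns (h ▸ hc')
        simp [hfx, this.symm]
      · simp [hfx]
    rw [hrw]
    have hperm := ih (l.filter (fun x => !(f x == c))) (List.nodup_cons.mp hnd).2 (by
      intro x hx
      rcases List.mem_filter.mp hx with ⟨hxl, hxne⟩
      have := hcov x hxl
      rcases List.mem_cons.mp this with h | h
      · exfalso; simp [h] at hxne
      · exact h)
    exact (hperm.append_left _).trans (List.filter_append_perm _ l)

theorem pv_flatMap_perm_congr (cs : List Int) (g1 g2 : Int → List Int)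
    (h : ∀ c ∈ cs, (g1 c).Perm (g2 c)) : (cs.flatMap g1).Perm (cs.flatMap g2) :=
  List.Perm.flatMap (List.Perm.refl cs) h

-- A's sort_m is a permutation of the keys …
theorem pv_sortmA_perm (cnt : PySem.Dict Int Int) :
    (((PySem.List.sorted
        (cnt.keys.foldl (fun d k => d.modify (cnt.getD k 0) [] (· ++ [k]))
          (PySem.Dict.empty : PySem.Dict Int (List Int))).keys (fun c => c) false).foldl
      (fun acc c => acc ++ PySem.List.sorted
        ((cnt.keys.foldl (fun d k => d.modify (cnt.getD k 0) [] (· ++ [k]))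
          (PySem.Dict.empty : PySem.Dict Int (List Int))).getD c [])
        (fun v => v) false) [])).Perm cnt.keys := by
  rw [PySem.List.foldl_append_eq_flatMap, List.nil_append]
  have hgetd : ∀ c, (cnt.keys.foldl (fun d k => d.modify (cnt.getD k 0) [] (· ++ [k]))
      (PySem.Dict.empty : PySem.Dict Int (List Int))).getD c []
        = cnt.keys.filter (fun k => cnt.getD k 0 == c) := pv_colle_getD cnt
  have h1 : ∀ c ∈ (PySem.List.sorted
      (cnt.keys.foldl (fun d k => d.modify (cnt.getD k 0) [] (· ++ [k]))
        (PySem.Dict.empty : PySem.Dict Int (List Int))).keys (fun c => c) false),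
      (PySem.List.sorted ((cnt.keys.foldl (fun d k => d.modify (cnt.getD k 0) [] (· ++ [k]))
          (PySem.Dict.empty : PySem.Dict Int (List Int))).getD c []) (fun v => v) false).Perm
        (cnt.keys.filter (fun k => cnt.getD k 0 == c)) := by
    intro c _
    rw [hgetd c]
    exact PySem.List.sorted_perm _ _ _
  refine (pv_flatMap_perm_congr _ _ _ h1).trans ?_
  -- now a flatMap of plain filters over the sorted distinct counts
  have hkeys := pv_colle_keys cnt
  have hperm2 : (PySem.List.sorted
      (cnt.keys.foldl (fun d k => d.modify (cnt.getD k 0) [] (· ++ [k]))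
        (PySem.Dict.empty : PySem.Dict Int (List Int))).keys (fun c => c) false).Perm
      (PySem.Set.ofList (cnt.keys.map (fun k => cnt.getD k 0))) := by
    rw [hkeys]; exact PySem.List.sorted_perm _ _ _
  refine (List.Perm.flatMap hperm2 (fun a _ => List.Perm.refl _)).trans ?_
  apply pv_perm_flatMap_filter (fun k => cnt.getD k 0)
  · exact PySem.Set.nodup_ofList _
  · intro x hx
    rw [PySem.Set.mem_ofList]
    exact List.mem_map_of_mem hx

-- … and strictly increasing by the pair (count, value)
theorem pv_sortmA_pairwise (cnt : PySem.Dict Int Int) (hnd : cnt.keys.Nodup) :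
    (((PySem.List.sorted
        (cnt.keys.foldl (fun d k => d.modify (cnt.getD k 0) [] (· ++ [k]))
          (PySem.Dict.empty : PySem.Dict Int (List Int))).keys (fun c => c) false).foldl
      (fun acc c => acc ++ PySem.List.sorted
        ((cnt.keys.foldl (fun d k => d.modify (cnt.getD k 0) [] (· ++ [k]))
          (PySem.Dict.empty : PySem.Dict Int (List Int))).getD c [])
        (fun v => v) false) [])).Pairwise
      (fun a b => cnt.getD a 0 < cnt.getD b 0 ∨ (¬ cnt.getD b 0 < cnt.getD a 0 ∧ a < b)) := by
  rw [PySem.List.foldl_append_eq_flatMap, List.nil_append]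
  have hmem : ∀ (c : Int) (a : Int),
      a ∈ PySem.List.sorted ((cnt.keys.foldl (fun d k => d.modify (cnt.getD k 0) [] (· ++ [k]))
        (PySem.Dict.empty : PySem.Dict Int (List Int))).getD c []) (fun v => v) false →
      cnt.getD a 0 = c := by
    intro c a ha
    rw [PySem.List.mem_sorted, pv_colle_getD] at ha
    exact beq_iff_eq.mp (List.mem_filter.mp ha).2
  rw [List.pairwise_flatMap]
  constructor
  · intro c _
    have hsle := PySem.List.sorted_pairwise
      ((cnt.keys.foldl (fun d k => d.modify (cnt.getD k 0) [] (· ++ [k]))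
        (PySem.Dict.empty : PySem.Dict Int (List Int))).getD c []) (fun v => v)
    have hsnd : (PySem.List.sorted ((cnt.keys.foldl (fun d k => d.modify (cnt.getD k 0) [] (· ++ [k]))
        (PySem.Dict.empty : PySem.Dict Int (List Int))).getD c []) (fun v => v) false).Nodup := by
      rw [pv_colle_getD]
      exact List.Perm.nodup (PySem.List.sorted_perm _ _ _).symm (hnd.filter _)
    have hlt := (hsle.and hsnd).imp (fun h => lt_of_le_of_ne h.1 h.2)
    refine hlt.imp_of_mem ?_
    intro a b ha hb hab
    right
    rw [hmem c a ha, hmem c b hb]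
    exact ⟨lt_irrefl c, hab⟩
  · have hcs : (PySem.List.sorted
        (cnt.keys.foldl (fun d k => d.modify (cnt.getD k 0) [] (· ++ [k]))
          (PySem.Dict.empty : PySem.Dict Int (List Int))).keys (fun c => c) false).Pairwise
        (· < ·) := by
      rw [pv_colle_keys]
      exact PySem.List.sorted_ofList_pairwise_lt _
    refine hcs.imp_of_mem ?_
    intro c d _ _ hcd a ha b hb
    left
    rw [hmem c a ha, hmem d b hb]
    exact hcd

-- ---- 3 & 4 & 5. expanded stream, anti-diagonals, and the loop simulation ----

def pvFlat (ps : List (Int × Nat)) : List Int := ps.flatMap (fun p => List.replicate p.2 p.1)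

def pvRv (ps : List (Int × Nat)) (cnts : PySem.Dict Int Int) (idx : Nat) (rem : List Int) : Prop :=
  (idx = ps.length ∧ rem = []) ∨
  (∃ v c rest r, ps.drop idx = (v, c) :: rest ∧ 1 ≤ r ∧ r ≤ c ∧ cnts.getD v 0 = (r : Int) ∧
    (∀ p ∈ rest, cnts.getD p.1 0 = (p.2 : Int)) ∧ rem = List.replicate r v ++ pvFlat rest)

theorem pvRv_nil (ps : List (Int × Nat)) (cnts : PySem.Dict Int Int) (idx : Nat)
    (h : pvRv ps cnts idx []) : ¬ idx < ps.length := by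
  rcases h with ⟨h1, _⟩ | ⟨v, c, rest, r, hdrop, hr, _, _, _, hrem⟩
  · omega
  · exfalso
    have : r = 0 := by
      by_contra hne
      rcases Nat.exists_eq_succ_of_ne_zero hne with ⟨t, ht⟩
      rw [ht] at hrem
      simp [List.replicate_succ] at hrem
    omega

theorem pvRv_step (ps : List (Int × Nat)) (hnd : (ps.map Prod.fst).Nodup)
    (hpos : ∀ p ∈ ps, 1 ≤ p.2)
    (cnts : PySem.Dict Int Int) (idx : Nat) (v : Int) (vs : List Int)
    (h : pvRv ps cnts idx (v :: vs)) :
    idx < ps.length ∧ (ps.map Prod.fst).getD idx 0 = v ∧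
      pvRv ps (cnts.modify v 0 (· - 1))
        (if (cnts.modify v 0 (· - 1)).getD v 0 = 0 then idx + 1 else idx) vs := by
  rcases h with ⟨_, habs⟩ | ⟨w, c, rest, r, hdrop, hr1, hrc, hget, hrest, hrem⟩
  · exact absurd habs (by simp)
  have hidx : idx < ps.length := by
    by_contra hge
    rw [List.drop_eq_nil_of_le (by omega)] at hdrop
    simp at hdrop
  -- the head of rem is w
  rcases Nat.exists_eq_succ_of_ne_zero (by omega : r ≠ 0) with ⟨t, ht⟩
  rw [ht, List.replicate_succ, List.cons_append] at hrem
  injection hrem with hwv hvs0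
  subst hwv
  -- rest's first components avoid v
  have hnotin : ∀ p ∈ rest, p.1 ≠ v := by
    have hmap : (ps.map Prod.fst).drop idx = v :: rest.map Prod.fst := by
      rw [← List.map_drop, hdrop]; rfl
    have hsub : ((ps.map Prod.fst).drop idx).Nodup := (List.drop_sublist _ _).nodup hnd
    rw [hmap] at hsub
    intro p hp hpe
    have : p.1 ∈ rest.map Prod.fst := List.mem_map_of_mem hp
    rw [hpe] at this
    exact (List.nodup_cons.mp hsub).1 this
  have hgetd : (ps.map Prod.fst).getD idx 0 = v := by
    have hmap : (ps.map Prod.fst).drop idx = v :: rest.map Prod.fst := by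
      rw [← List.map_drop, hdrop]; rfl
    have h1 : (ps.map Prod.fst)[idx]? = some v := by
      rw [← List.head?_drop, hmap]; rfl
    simp [List.getD_eq_getElem?_getD, h1]
  refine ⟨hidx, hgetd, ?_⟩
  have hgm : (cnts.modify v 0 (· - 1)).getD v 0 = (r : Int) - 1 := by
    rw [PySem.Dict.getD_modify_self, hget]
  have hrestm : ∀ p ∈ rest, (cnts.modify v 0 (· - 1)).getD p.1 0 = (p.2 : Int) := by
    intro p hp
    rw [PySem.Dict.getD_modify_of_ne _ _ _ (hnotin p hp), hrest p hp]
  by_cases hr : r = 1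
  · -- current value exhausted; advance idx
    have hz : (cnts.modify v 0 (· - 1)).getD v 0 = 0 := by rw [hgm, hr]; ring
    rw [if_pos hz]
    have hdrop1 : ps.drop (idx + 1) = rest := by
      rw [← List.tail_drop, hdrop]; rfl
    have hvs : vs = pvFlat rest := by
      have ht0 : t = 0 := by omega
      rw [ht0] at hvs0; simpa using hvs0
    cases rest with
    | nil =>
      left
      constructor
      · have : ps.length ≤ idx + 1 := by
          by_contra hlt
          have := hdrop1
          rw [List.drop_eq_nil_iff] at this
          omega
        omega
      · simpa [pvFlat] using hvs
    | cons q rest2 =>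
      right
      refine ⟨q.1, q.2, rest2, q.2, by rw [hdrop1], ?_, le_refl _, ?_, ?_, ?_⟩
      · have : q ∈ ps := List.mem_of_mem_drop (by rw [hdrop1]; exact List.mem_cons_self)
        exact hpos q this
      · have := hrestm q (List.mem_cons_self)
        simpa using this
      · intro p hp
        exact hrestm p (List.mem_cons_of_mem _ hp)
      · rw [hvs]; simp [pvFlat]
  · -- still copies of v to place
    have hz : ¬ (cnts.modify v 0 (· - 1)).getD v 0 = 0 := by
      rw [hgm]
      have : 2 ≤ r := by omega
      omega
    rw [if_neg hz]
    right
    refine ⟨v, c, rest, r - 1, hdrop, by omega, by omega, ?_, hrestm, ?_⟩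
    · rw [hgm]; push_cast [Nat.cast_sub (by omega : 1 ≤ r)]; ring
    · rw [hvs0]
      congr 2
      omega

def pvDiag (s hi : Nat) : Nat → List (Nat × Nat)
  | 0 => [(hi, s - hi)]
  | k + 1 => (hi, s - hi) :: pvDiag s (hi - 1) k

def pvCh (n : Nat) (p : Nat × Nat) : List (Nat × Nat) :=
  (if 1 ≤ p.2 ∧ p.1 + 1 = n then [(p.1, p.2 - 1)] else []) ++
  (if 1 ≤ p.1 then [(p.1 - 1, p.2)] else [])

theorem pv_chTail (n s : Nat) (hs : 1 ≤ s) :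
    ∀ (k x : Nat), k ≤ x → x ≤ n - 1 → (x + 1 = n → s ≤ x) →
    (pvDiag s x k).flatMap (pvCh n) =
      if k < x then pvDiag (s - 1) (x - 1) k
      else if x = 0 then [] else pvDiag (s - 1) (x - 1) (x - 1) := by
  intro k
  induction k with
  | zero =>
    intro x _ hxn hxs
    have hch : pvCh n (x, s - x) = if 1 ≤ x then [(x - 1, s - x)] else [] := by
      unfold pvCh
      have : ¬ (1 ≤ s - x ∧ x + 1 = n) := by
        rintro ⟨h1, h2⟩
        have := hxs h2
        omega
      simp only [this, if_false, List.nil_append]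
    simp only [pvDiag, List.flatMap_cons, List.flatMap_nil, List.append_nil, hch]
    by_cases hx : 1 ≤ x
    · have h1 : ¬ (0 < x) → False := by omega
      have h2 : s - x = (s - 1) - (x - 1) := by omega
      simp only [if_pos hx, if_pos (by omega : 0 < x)]
      simp [h2]
    · simp only [if_neg hx]
      have : x = 0 := by omega
      simp [this]
  | succ k ih =>
    intro x hkx hxn hxs
    have hx1 : 1 ≤ x := by omega
    have hch : pvCh n (x, s - x) = [(x - 1, s - x)] := by
      unfold pvCh
      have : ¬ (1 ≤ s - x ∧ x + 1 = n) := by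
        rintro ⟨h1, h2⟩
        have := hxs h2
        omega
      simp [this, hx1]
    have htail := ih (x - 1) (by omega) (by omega) (by omega)
    simp only [pvDiag, List.flatMap_cons, hch]
    rw [htail]
    by_cases hkk : k < x - 1
    · have h2 : s - x = (s - 1) - (x - 1) := by omega
      simp only [if_pos hkk, if_pos (by omega : k + 1 < x)]
      cases k with
      | zero => simp [h2]
      | succ k => simp [pvDiag, h2]
    · -- k = x - 1, so k + 1 = x
      have hke : k = x - 1 := by omega
      simp only [if_neg hkk, if_neg (by omega : ¬ k + 1 < x)]
      by_cases hx0 : x - 1 = 0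
      · -- x = 1, k = 0
        have hxe : x = 1 := by omega
        have hk0 : k = 0 := by omega
        subst hxe hk0
        simp [pvDiag]
      · simp only [if_neg hx0]
        have h2 : s - x = (s - 1) - (x - 1) := by omega
        have hstep : (x - 1, (s - 1) - (x - 1)) :: pvDiag (s - 1) ((x - 1) - 1) ((x - 1) - 1)
            = pvDiag (s - 1) (x - 1) (x - 1) := by
          cases hx1' : x - 1 with
          | zero => omega
          | succ t => simp [pvDiag]
        rw [if_neg (by omega : ¬ x = 0), h2, ← hstep]
        simp

theorem pv_children_diag (n s : Nat) (hn : 1 ≤ n) (hs : 1 ≤ s) (hs2 : s ≤ 2 * n - 2) :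
    (pvDiag s (min (n - 1) s) (min (n - 1) s - (s - (n - 1)))).flatMap (pvCh n) =
      pvDiag (s - 1) (min (n - 1) (s - 1)) (min (n - 1) (s - 1) - ((s - 1) - (n - 1))) := by
  by_cases hcase : s ≤ n - 1
  · -- low diagonal: hi = s, lo = 0, k = s
    have h1 : min (n - 1) s = s := by omega
    have h2 : s - (n - 1) = 0 := by omega
    have h3 : min (n - 1) (s - 1) = s - 1 := by omega
    have h4 : (s - 1) - (n - 1) = 0 := by omega
    rw [h1, h2, h3, h4, Nat.sub_zero, Nat.sub_zero]
    have := pv_chTail n s hs s s (le_refl s) hcase (by omega)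
    rw [this]
    simp only [lt_irrefl, if_false, if_neg (by omega : ¬ s = 0)]
  · -- high diagonal: hi = n - 1, lo = s - (n - 1) ≥ 1
    have hn2 : 2 ≤ n := by omega
    have hsn : n ≤ s := by omega
    have h1 : min (n - 1) s = n - 1 := by omega
    have h3 : min (n - 1) (s - 1) = n - 1 := by omega
    rw [h1, h3]
    set k := (n - 1) - (s - (n - 1)) with hk
    have hkval : k = 2 * n - 2 - s := by omega
    have hk2 : (n - 1) - ((s - 1) - (n - 1)) = k + 1 := by omega
    rw [hk2]
    have hch : pvCh n (n - 1, s - (n - 1)) = [(n - 1, s - (n - 1) - 1), (n - 2, s - (n - 1))] := by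
      unfold pvCh
      have hc1 : 1 ≤ s - (n - 1) ∧ (n - 1) + 1 = n := by omega
      simp [hc1, (by omega : 1 ≤ n - 1), (by omega : n - 1 - 1 = n - 2)]
    cases hk0 : k with
    | zero =>
      -- s = 2n - 2, diagonal is the single corner cell
      have hse : s = 2 * n - 2 := by omega
      simp only [pvDiag, List.flatMap_cons, List.flatMap_nil, List.append_nil, hch]
      have e1 : s - (n - 1) - 1 = (s - 1) - (n - 1) := by omega
      have e2 : s - (n - 1) = (s - 1) - (n - 2) := by omega
      have e3 : n - 1 - 1 = n - 2 := by omega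
      simp [e2, e3]
      omega
    | succ t =>
      -- head cell plus a tail of length t + 1 handled by pv_chTail
      have htail := pv_chTail n s hs t (n - 2) (by omega) (by omega) (by omega)
      have hts : t < n - 2 := by omega
      rw [if_pos hts] at htail
      simp only [pvDiag, List.flatMap_cons, hch, (by omega : n - 1 - 1 = n - 2)]
      rw [htail]
      have e1 : s - (n - 1) - 1 = (s - 1) - (n - 1) := by omega
      have e2 : s - (n - 1) = (s - 1) - (n - 2) := by omega
      have e3 : n - 2 - 1 = n - 3 := by omega
      simp [e2, e3]
      omega

theorem pv_loopA_done (n : Nat) (ps : List (Int × Nat)) (cnts : PySem.Dict Int Int)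
    (fuel : Nat) (hf : 1 ≤ fuel) (m : List (List Int)) (q : List (Nat × Nat)) (idx : Nat)
    (h : pvRv ps cnts idx []) :
    pvLoopA n fuel m cnts (ps.map Prod.fst) q idx = m := by
  have hnlt : ¬ idx < (ps.map Prod.fst).length := by
    rw [List.length_map]; exact pvRv_nil ps cnts idx h
  cases fuel with
  | zero => omega
  | succ f =>
    cases q with
    | nil => rfl
    | cons p qs =>
      obtain ⟨x, y⟩ := p
      simp only [pvLoopA, if_neg hnlt]

theorem pvLoopA_cons (n f : Nat) (m : List (List Int)) (cnts : PySem.Dict Int Int)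
    (sortm : List Int) (x y : Nat) (qs : List (Nat × Nat)) (idx : Nat)
    (h : idx < sortm.length) (hnb : ¬ (x = 0 ∧ y = 0)) :
    pvLoopA n (f + 1) m cnts sortm ((x, y) :: qs) idx =
      pvLoopA n f (pvSet2d m x y (sortm.getD idx 0))
        (cnts.modify (sortm.getD idx 0) 0 (· - 1)) sortm
        (qs ++ pvCh n (x, y))
        (if (cnts.modify (sortm.getD idx 0) 0 (· - 1)).getD (sortm.getD idx 0) 0 = 0
          then idx + 1 else idx) := by
  simp only [pvLoopA, if_pos h, if_neg hnb]
  congr 1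
  unfold pvCh
  split_ifs <;> simp

theorem pvLoopA_break (n f : Nat) (m : List (List Int)) (cnts : PySem.Dict Int Int)
    (sortm : List Int) (qs : List (Nat × Nat)) (idx : Nat) (h : idx < sortm.length) :
    pvLoopA n (f + 1) m cnts sortm ((0, 0) :: qs) idx
      = pvSet2d m 0 0 (sortm.getD idx 0) := by
  simp [pvLoopA, if_pos h]

theorem pv_diag_step (n s : Nat) (ps : List (Int × Nat)) (hnd : (ps.map Prod.fst).Nodup)
    (hpos : ∀ p ∈ ps, 1 ≤ p.2) (hs : 1 ≤ s) :
    ∀ (k x : Nat) (fuel : Nat) (m : List (List Int)) (cnts : PySem.Dict Int Int)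
      (idx : Nat) (rem : List Int) (p : List (Nat × Nat)),
      pvRv ps cnts idx rem → k ≤ x → k + 2 ≤ fuel →
      ∃ cnts' idx',
        pvRv ps cnts' idx' (pvFillDiagB s x k (m, rem)).2 ∧
        pvLoopA n fuel m cnts (ps.map Prod.fst) (pvDiag s x k ++ p) idx =
          (if (pvFillDiagB s x k (m, rem)).2 = [] then (pvFillDiagB s x k (m, rem)).1
           else pvLoopA n (fuel - (k + 1)) (pvFillDiagB s x k (m, rem)).1 cnts' (ps.map Prod.fst)
             (p ++ (pvDiag s x k).flatMap (pvCh n)) idx') := by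
  intro k
  induction k with
  | zero =>
    intro x fuel m cnts idx rem p hrv hkx hfuel
    cases rem with
    | nil =>
      refine ⟨cnts, idx, by simpa [pvFillDiagB] using hrv, ?_⟩
      rw [pv_loopA_done n ps cnts fuel (by omega) m _ idx hrv]
      simp [pvFillDiagB]
    | cons v vs =>
      obtain ⟨hidx, hval, hrv'⟩ := pvRv_step ps hnd hpos cnts idx v vs hrv
      have hidxm : idx < (ps.map Prod.fst).length := by rw [List.length_map]; exact hidx
      obtain ⟨f, rfl⟩ : ∃ f, fuel = f + 1 := ⟨fuel - 1, by omega⟩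
      have hnb : ¬ (x = 0 ∧ s - x = 0) := by rintro ⟨h1, h2⟩; omega
      have hstep := pvLoopA_cons n f m cnts (ps.map Prod.fst) x (s - x) p idx hidxm hnb
      rw [hval] at hstep
      simp only [pvDiag, List.cons_append, List.nil_append]
      rw [hstep]
      refine ⟨cnts.modify v 0 (· - 1),
        (if (cnts.modify v 0 (· - 1)).getD v 0 = 0 then idx + 1 else idx), hrv', ?_⟩
      cases hvs : vs with
      | nil =>
        have hrv0 : pvRv ps (cnts.modify v 0 (· - 1))
            (if (cnts.modify v 0 (· - 1)).getD v 0 = 0 then idx + 1 else idx) [] := by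
          rw [← hvs]; exact hrv'
        rw [pv_loopA_done n ps _ f (by omega) _ _ _ hrv0]
        simp [pvFillDiagB]
      | cons v2 vs2 =>
        simp [pvFillDiagB]
  | succ k ih =>
    intro x fuel m cnts idx rem p hrv hkx hfuel
    cases rem with
    | nil =>
      refine ⟨cnts, idx, by simpa [pvFillDiagB] using hrv, ?_⟩
      rw [pv_loopA_done n ps cnts fuel (by omega) m _ idx hrv]
      simp [pvFillDiagB]
    | cons v vs =>
      obtain ⟨hidx, hval, hrv'⟩ := pvRv_step ps hnd hpos cnts idx v vs hrv
      have hidxm : idx < (ps.map Prod.fst).length := by rw [List.length_map]; exact hidx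
      obtain ⟨f, rfl⟩ : ∃ f, fuel = f + 1 := ⟨fuel - 1, by omega⟩
      have hnb : ¬ (x = 0 ∧ s - x = 0) := by rintro ⟨h1, h2⟩; omega
      have hstep := pvLoopA_cons n f m cnts (ps.map Prod.fst) x (s - x)
        (pvDiag s (x - 1) k ++ p) idx hidxm hnb
      rw [hval] at hstep
      simp only [pvDiag, List.cons_append]
      rw [hstep, List.append_assoc]
      obtain ⟨cnts2, idx2, hrv2, heq⟩ := ih (x - 1) f (pvSet2d m x (s - x) v)
        (cnts.modify v 0 (· - 1))
        (if (cnts.modify v 0 (· - 1)).getD v 0 = 0 then idx + 1 else idx)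
        vs (p ++ pvCh n (x, s - x)) hrv' (by omega) (by omega)
      have hfd : pvFillDiagB s x (k + 1) (m, v :: vs)
          = pvFillDiagB s (x - 1) k (pvSet2d m x (s - x) v, vs) := rfl
      refine ⟨cnts2, idx2, by rw [hfd]; exact hrv2, ?_⟩
      rw [heq, hfd]
      have hfuel2 : f - (k + 1) = f + 1 - (k + 1 + 1) := by omega
      rw [hfuel2]
      congr 1
      simp only [List.flatMap_cons]
      rw [List.append_assoc]

theorem pv_fillB_nil (n : Nat) (s : Nat) (m : List (List Int)) :
    pvFillB n s (m, []) = m := by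
  cases s <;> rfl

theorem pv_outer (n : Nat) (hn : 1 ≤ n) (ps : List (Int × Nat)) (hnd : (ps.map Prod.fst).Nodup)
    (hpos : ∀ p ∈ ps, 1 ≤ p.2) :
    ∀ (s : Nat) (fuel : Nat) (m : List (List Int)) (cnts : PySem.Dict Int Int)
      (idx : Nat) (rem : List Int),
      s ≤ 2 * n - 2 → pvRv ps cnts idx rem → (s + 1) * n + 2 ≤ fuel →
      pvLoopA n fuel m cnts (ps.map Prod.fst)
          (pvDiag s (min (n - 1) s) (min (n - 1) s - (s - (n - 1)))) idx =
        pvFillB n s (m, rem) := by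
  intro s
  induction s with
  | zero =>
    intro fuel m cnts idx rem hs hrv hfuel
    have he : pvDiag 0 (min (n - 1) 0) (min (n - 1) 0 - (0 - (n - 1))) = [(0, 0)] := by
      simp [pvDiag]
    rw [he]
    cases rem with
    | nil =>
      rw [pv_loopA_done n ps cnts fuel (by omega) m _ idx hrv, pv_fillB_nil]
    | cons v vs =>
      obtain ⟨hidx, hval, _⟩ := pvRv_step ps hnd hpos cnts idx v vs hrv
      have hidxm : idx < (ps.map Prod.fst).length := by rw [List.length_map]; exact hidx
      obtain ⟨f, rfl⟩ : ∃ f, fuel = f + 1 := ⟨fuel - 1, by omega⟩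
      rw [pvLoopA_break n f m cnts _ _ idx hidxm, hval]
      simp [pvFillB, pvFillDiagB]
  | succ s ih =>
    intro fuel m cnts idx rem hs hrv hfuel
    cases rem with
    | nil =>
      rw [pv_loopA_done n ps cnts fuel (by omega) m _ idx hrv, pv_fillB_nil]
    | cons v vs =>
      set hi := min (n - 1) (s + 1) with hhi
      set k := min (n - 1) (s + 1) - ((s + 1) - (n - 1)) with hk
      have hkx : k ≤ hi := by omega
      have hkn : k + 1 ≤ n := by omega
      have hmul : (s + 1 + 1) * n = n + (s + 1) * n := by ring
      obtain ⟨cnts', idx', hrv', heq⟩ := pv_diag_step n (s + 1) ps hnd hpos (by omega)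
        k hi fuel m cnts idx (v :: vs) [] hrv hkx (by omega)
      rw [List.append_nil] at heq
      rw [heq]
      have hB : pvFillB n (s + 1) (m, v :: vs)
          = pvFillB n s (pvFillDiagB (s + 1) hi k (m, v :: vs)) := rfl
      rw [hB]
      by_cases hrem : (pvFillDiagB (s + 1) hi k (m, v :: vs)).2 = []
      · rw [if_pos hrem]
        have : pvFillDiagB (s + 1) hi k (m, v :: vs)
            = ((pvFillDiagB (s + 1) hi k (m, v :: vs)).1, []) := by
          rw [← hrem]
        rw [this, pv_fillB_nil]
      · rw [if_neg hrem, List.nil_append]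
        have hch := pv_children_diag n (s + 1) hn (by omega) hs
        simp only [Nat.add_sub_cancel] at hch
        rw [← hhi, ← hk] at hch
        rw [hch]
        have := ih (fuel - (k + 1)) (pvFillDiagB (s + 1) hi k (m, v :: vs)).1 cnts' idx'
          (pvFillDiagB (s + 1) hi k (m, v :: vs)).2 (by omega) hrv' (by omega)
        rw [this]

theorem pvRv_init (ps : List (Int × Nat)) (cnts : PySem.Dict Int Int)
    (hpos : ∀ p ∈ ps, 1 ≤ p.2)
    (h : ∀ p ∈ ps, cnts.getD p.1 0 = (p.2 : Int)) : pvRv ps cnts 0 (pvFlat ps) := by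
  cases ps with
  | nil => exact Or.inl ⟨rfl, rfl⟩
  | cons q rest =>
    right
    refine ⟨q.1, q.2, rest, q.2, by simp, hpos q List.mem_cons_self, le_refl _,
      h q List.mem_cons_self, fun p hp => h p (List.mem_cons_of_mem _ hp), ?_⟩
    simp [pvFlat]

-- ---- 6. assembling the two ports ----

theorem pv_ports_eq (m : List (List Int)) :
    sortMatrix_two_ascending_criteria m = sortMatrix_two_ascending_criteria_alt m := by
  by_cases hm : m = []
  · subst hm; rfl
  · have hn : 1 ≤ m.length := by
      cases m with
      | nil => exact absurd rfl hm
      | cons r t => simp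
    simp only [sortMatrix_two_ascending_criteria, sortMatrix_two_ascending_criteria_alt,
      if_neg hm]
    rw [pv_cntA_eq m (m.getD 0 []).length, pv_cntB_eq m (m.getD 0 []).length]
    set n := m.length with hn'
    set cols := (m.getD 0 []).length with hcols
    set C := PySem.Dict.counter (pvGrid m cols) with hC
    set S := ((PySem.List.sorted
        (C.keys.foldl (fun d k => d.modify (C.getD k 0) [] (· ++ [k]))
          (PySem.Dict.empty : PySem.Dict Int (List Int))).keys (fun c => c) false).foldl
      (fun acc c => acc ++ PySem.List.sorted
        ((C.keys.foldl (fun d k => d.modify (C.getD k 0) [] (· ++ [k]))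
          (PySem.Dict.empty : PySem.Dict Int (List Int))).getD c [])
        (fun v => v) false) []) with hS
    have hkeysnd : C.keys.Nodup := PySem.Dict.nodup_keys_counter _
    have hs2 : PySem.List.sorted2 C.keys (fun v => C.getD v 0) (fun v => v) false = S :=
      pv_sorted2_eq C.keys S (fun v => C.getD v 0) (pv_sortmA_perm C) (pv_sortmA_pairwise C hkeysnd)
    rw [hs2]
    set ps := S.map (fun v => (v, (C.getD v 0).toNat)) with hps
    have hfst : ps.map Prod.fst = S := by
      rw [hps, List.map_map]
      exact List.map_id' _
    have hSnd : S.Nodup := List.Perm.nodup (pv_sortmA_perm C).symm hkeysnd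
    have hndf : (ps.map Prod.fst).Nodup := by rw [hfst]; exact hSnd
    have hgetDpos : ∀ v ∈ S, 1 ≤ (C.getD v 0).toNat := by
      intro v hv
      have hvk : v ∈ C.keys := (pv_sortmA_perm C).subset hv
      rw [hC, PySem.Dict.keys_counter, PySem.Set.mem_ofList] at hvk
      have := List.count_pos_iff.mpr hvk
      rw [hC, PySem.Dict.getD_counter]
      omega
    have hpos : ∀ p ∈ ps, 1 ≤ p.2 := by
      intro p hp
      rw [hps] at hp
      rcases List.mem_map.mp hp with ⟨v, hv, rfl⟩
      exact hgetDpos v hv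
    have hinit0 : ∀ p ∈ ps, C.getD p.1 0 = (p.2 : Int) := by
      intro p hp
      rw [hps] at hp
      rcases List.mem_map.mp hp with ⟨v, hv, rfl⟩
      have : (0 : Int) ≤ C.getD v 0 := by
        rw [hC, PySem.Dict.getD_counter]; positivity
      simp [Int.toNat_of_nonneg this]
    have hexp : S.foldl (fun acc v => acc ++ List.replicate (C.getD v 0).toNat v) [] = pvFlat ps := by
      rw [PySem.List.foldl_append_eq_flatMap, List.nil_append, pvFlat, hps, List.flatMap_map]
    rw [hexp]
    have hq : [(n - 1, n - 1)]
        = pvDiag (2 * n - 2) (min (n - 1) (2 * n - 2))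
            (min (n - 1) (2 * n - 2) - ((2 * n - 2) - (n - 1))) := by
      have h1 : min (n - 1) (2 * n - 2) = n - 1 := by omega
      have h2 : (n - 1) - ((2 * n - 2) - (n - 1)) = 0 := by omega
      rw [h1, h2]
      simp [pvDiag, show (2 * n - 2) - (n - 1) = n - 1 from by omega]
    rw [hq, ← hfst]
    apply pv_outer n hn ps hndf hpos (2 * n - 2) (2 * n * n + 2) m C 0 (pvFlat ps)
      (le_refl _) (pvRv_init ps C hpos hinit0)
    have hmul : (2 * n - 2 + 1) * n ≤ 2 * n * n := by
      have := Nat.mul_le_mul_right n (show 2 * n - 2 + 1 ≤ 2 * n from by omega)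
      omega
    omega

-- ===== VERDICT (by name: the statement is the Claim_ definition above) =====
theorem sortMatrix_two_ascending_criteria_spec : Claim_equal_sortMatrix_two_ascending_criteria := by
  intro m _ _
  exact pv_ports_eq m
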